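-- pv_equiv track=rewrite | github.com/MarkForged/GOMP | gomp/gomp.py | construct_diff_list
-- ===== SOURCE A (Python) =====
-- class BColors:
--     # pylint: disable=invalid-name
--     WHITE = '\033[37m'
--     HEADER = '\033[95m'
--     COMMON = '\033[92m'
--     SRC_NEW = '\033[95m'
--     DEST_NEW = '\033[91m'
--     SIMILAR = '\033[93m'
--     BOLD = '\033[1m'
--     UNDERLINE = '\033[4m'
--     ENDC = '\033[0m'
--
-- hash_length = 7
--
-- def construct_diff_list(
--     commits, source_title_map, destination_title_map, end_hash
-- ):
--     i = 0
--     trailing_rows = 5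
--     count_down_trailing_rows = False
--     rows = []
--     # Print until matching hash found
--     while trailing_rows > 0:
--         row = commits[i]
--         _hash = row[0]
--         _title = row[1]
--         exists_in_source = _title in source_title_map
--         exists_in_destination = _title in destination_title_map
--         exists_in_both = exists_in_source and exists_in_destination
--         same_commit = (
--             exists_in_both
--             and source_title_map[_title] == destination_title_map[_title]
--         )
--
--         # Color code outputs based on existence in branches
--         if same_commit:
--             rows.append([_hash[0:hash_length] + ' ' + _title, BColors.COMMON])
--         elif exists_in_both:
--             rows.append([_hash[0:hash_length] + ' ' + _title, BColors.SIMILAR])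
--         elif exists_in_destination:
--             rows.append([_hash[0:hash_length] + ' ' + _title, BColors.DEST_NEW])
--         elif exists_in_source:
--             rows.append([_hash[0:hash_length] + ' ' + _title, BColors.SRC_NEW])
--         else:
--             raise Exception('https://xkcd.com/2200/')
--
--         # If there are no more commits, we're done
--         i += 1
--         if i >= len(commits):
--             break
--
--         # If the target hash is found, start a countdown of trailing context commits.
--         if _hash == end_hash:
--             count_down_trailing_rows = True
--         elif count_down_trailing_rows:
--             trailing_rows -= 1
--
--     return rows
-- ===== SOURCE B (Python) =====
-- class BColors:
--     # pylint: disable=invalid-name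
--     WHITE = '\033[37m'
--     HEADER = '\033[95m'
--     COMMON = '\033[92m'
--     SRC_NEW = '\033[95m'
--     DEST_NEW = '\033[91m'
--     SIMILAR = '\033[93m'
--     BOLD = '\033[1m'
--     UNDERLINE = '\033[4m'
--     ENDC = '\033[0m'
--
-- hash_length = 7
--
--
-- def _classify(title, source_title_map, destination_title_map):
--     in_source = title in source_title_map
--     in_destination = title in destination_title_map
--     if in_source and in_destination:
--         if source_title_map[title] == destination_title_map[title]:
--             return BColors.COMMON
--         return BColors.SIMILAR
--     if in_destination:
--         return BColors.DEST_NEW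
--     if in_source:
--         return BColors.SRC_NEW
--     return None
--
--
-- def construct_diff_list(
--     commits, source_title_map, destination_title_map, end_hash
-- ):
--     # Phase 1: find the cutoff index from the hashes alone.
--     n = len(commits)
--     cutoff = n
--     for e in range(n):
--         if commits[e][0] == end_hash:
--             j = e + 1
--             remaining = 5
--             while j < n and remaining > 0:
--                 if commits[j][0] != end_hash:
--                     remaining -= 1
--                 j += 1
--             cutoff = j
--             break
--     # Phase 2: render the prefix.
--     rows = []
--     for row in commits[:cutoff]:
--         color = _classify(row[1], source_title_map, destination_title_map)
--         if color is None:
--             raise Exception('https://xkcd.com/2200/')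
--         rows.append([row[0][0:hash_length] + ' ' + row[1], color])
--     return rows
-- ===== Notes on version B (the rewrite author's own statement) =====
-- stated objective: alternative
-- what changed: A's single interleaved while loop carrying an index, a trailing-rows countdown and the output list is split into two independent phases: a hash-only scan that computes the cutoff index (first end_hash occurrence extended by 5 trailing non-end_hash rows), then a pure rendering pass over commits[:cutoff].
import Mathlib
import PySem

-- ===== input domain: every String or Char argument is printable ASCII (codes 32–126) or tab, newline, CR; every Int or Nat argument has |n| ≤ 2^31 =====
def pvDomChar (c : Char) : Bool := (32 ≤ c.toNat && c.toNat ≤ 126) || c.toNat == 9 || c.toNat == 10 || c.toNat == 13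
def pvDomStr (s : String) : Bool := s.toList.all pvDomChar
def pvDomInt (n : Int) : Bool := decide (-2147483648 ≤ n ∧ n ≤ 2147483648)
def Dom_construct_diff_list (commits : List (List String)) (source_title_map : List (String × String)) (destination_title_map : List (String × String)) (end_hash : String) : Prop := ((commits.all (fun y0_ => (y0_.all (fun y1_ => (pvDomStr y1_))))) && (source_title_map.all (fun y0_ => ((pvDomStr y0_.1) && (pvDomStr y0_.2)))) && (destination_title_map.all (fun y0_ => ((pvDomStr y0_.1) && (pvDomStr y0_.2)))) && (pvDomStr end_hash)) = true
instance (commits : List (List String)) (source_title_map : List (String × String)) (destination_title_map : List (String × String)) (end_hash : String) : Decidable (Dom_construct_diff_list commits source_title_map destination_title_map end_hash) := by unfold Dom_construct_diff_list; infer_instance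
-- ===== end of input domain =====

-- B replaces A's single interleaved loop (index + countdown + colour state) by two phases: a hash-only
-- scan computing the cutoff index, then a pure rendering pass over commits[:cutoff]; return values agree
-- on Pre_ (exactly the inputs where A returns without raising).

-- ===== PORT A =====
-- A's while loop: state i / trailing_rows / count_down_trailing_rows / rows.  The inner `else rows`
-- branch is Python's `raise Exception('https://xkcd.com/2200/')`; Pre_ excludes it.  `commits.getD i []`
-- is commits[i] (Pre_ keeps i in range: commits ≠ [] and the loop breaks before i reaches len(commits)).
def cdlLoopA (commits : List (List String)) (source_title_map : List (String × String)) (destination_title_map : List (String × String)) (end_hash : String) (i : Nat) (trailing : Int) (countdown : Bool) (rows : List (List String)) : List (List String) :=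
  if trailing ≤ 0 then rows
  else
    let row := commits.getD i []
    let _hash := row.getD 0 ""
    let _title := row.getD 1 ""
    let sv := (source_title_map.find? (fun p => p.1 == _title)).map (·.2)
    let dv := (destination_title_map.find? (fun p => p.1 == _title)).map (·.2)
    let exists_in_both := sv.isSome && dv.isSome
    let same_commit := exists_in_both && (sv == dv)
    let hdr := PySem.Str.slice _hash (some 0) (some 7) ++ " " ++ _title
    let rows' :=
      if same_commit then rows ++ [[hdr, "\x1B[92m"]]
      else if exists_in_both then rows ++ [[hdr, "\x1B[93m"]]
      else if dv.isSome then rows ++ [[hdr, "\x1B[91m"]]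
      else if sv.isSome then rows ++ [[hdr, "\x1B[95m"]]
      else rows  -- Python raises here; outside Pre_
    if _h : i + 1 ≥ commits.length then rows'
    else
      let countdown' := if _hash == end_hash then true else countdown
      let trailing' := if _hash == end_hash then trailing else if countdown then trailing - 1 else trailing
      cdlLoopA commits source_title_map destination_title_map end_hash (i + 1) trailing' countdown' rows'
termination_by commits.length - i
decreasing_by omega

def construct_diff_list (commits : List (List String)) (source_title_map : List (String × String)) (destination_title_map : List (String × String)) (end_hash : String) : List (List String) :=
  cdlLoopA commits source_title_map destination_title_map end_hash 0 5 false []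

-- ===== PORT B =====
-- Phase 1a: the trailing-context while loop — walk j from e+1, counting down `remaining` on rows whose
-- hash differs from end_hash.
def cdlWhileB (commits : List (List String)) (end_hash : String) (j : Nat) (remaining : Int) : Nat :=
  if _h : j < commits.length ∧ 0 < remaining then
    let remaining' := if (commits.getD j []).getD 0 "" = end_hash then remaining else remaining - 1
    cdlWhileB commits end_hash (j + 1) remaining'
  else j
termination_by commits.length - j
decreasing_by omega

-- Phase 1b: find the first row whose hash is end_hash and hand over to the while loop; if none, the
-- cutoff is len(commits).
def cdlCutoff (commits : List (List String)) (end_hash : String) (e : Nat) : Nat :=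
  if _h : e < commits.length then
    if (commits.getD e []).getD 0 "" = end_hash then cdlWhileB commits end_hash (e + 1) 5
    else cdlCutoff commits end_hash (e + 1)
  else commits.length
termination_by commits.length - e
decreasing_by omega

-- Source B's _classify: the colour for a title, none = Python's raise (excluded by Pre_).
def cdlClassify (title : String) (source_title_map : List (String × String)) (destination_title_map : List (String × String)) : Option String :=
  let sv := (source_title_map.find? (fun p => p.1 == title)).map (·.2)
  let dv := (destination_title_map.find? (fun p => p.1 == title)).map (·.2)
  match sv, dv with
  | some s, some d => if s = d then some "\x1B[92m" else some "\x1B[93m"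
  | none, some _ => some "\x1B[91m"
  | some _, none => some "\x1B[95m"
  | none, none => none

-- Phase 2: render each row of the prefix; on an unclassifiable title Python raises (outside Pre_).
def cdlRender (source_title_map : List (String × String)) (destination_title_map : List (String × String)) : List (List String) → List (List String)
  | [] => []
  | row :: rest =>
    match cdlClassify (row.getD 1 "") source_title_map destination_title_map with
    | none => []  -- Python raises here; outside Pre_
    | some color =>
      [PySem.Str.slice (row.getD 0 "") (some 0) (some 7) ++ " " ++ row.getD 1 "", color] :: cdlRender source_title_map destination_title_map rest

def construct_diff_list_alt (commits : List (List String)) (source_title_map : List (String × String)) (destination_title_map : List (String × String)) (end_hash : String) : List (List String) :=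
  cdlRender source_title_map destination_title_map (commits.take (cdlCutoff commits end_hash 0))

-- ===== PRECONDITION & SPEC =====
-- cdlCnt commits end_hash a b = how many rows with index in [a, b) have a first field ≠ end_hash
-- (closed-form list expression used only to state Pre_).
def cdlCnt (commits : List (List String)) (end_hash : String) (a b : Nat) : Nat :=
  ((commits.drop a).take (b - a)).countP (fun r => r.getD 0 "" != end_hash)

-- Pre_ excludes exactly the inputs on which Python A raises: empty commits (IndexError on commits[0]),
-- and a row of fewer than 2 fields (IndexError) or with a title in neither map (the explicit raise)
-- among the rows A actually reaches — index i is reached iff no earlier end_hash row is already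
-- followed by 5 non-end_hash rows before i (the trailing-context countdown has not expired).
def Pre_construct_diff_list (commits : List (List String)) (source_title_map : List (String × String)) (destination_title_map : List (String × String)) (end_hash : String) : Prop :=
  commits ≠ [] ∧ ∀ i < commits.length,
    (∀ e < i, (commits.getD e []).getD 0 "" = end_hash → cdlCnt commits end_hash (e + 1) i < 5) →
    (2 ≤ (commits.getD i []).length ∧
      ((∃ p ∈ source_title_map, p.1 = (commits.getD i []).getD 1 "") ∨
       (∃ p ∈ destination_title_map, p.1 = (commits.getD i []).getD 1 "")))
instance (commits : List (List String)) (source_title_map : List (String × String)) (destination_title_map : List (String × String)) (end_hash : String) : Decidable (Pre_construct_diff_list commits source_title_map destination_title_map end_hash) := by unfold Pre_construct_diff_list; infer_instance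

def pvWitness_construct_diff_list : List (List String) × (List (String × String)) × (List (String × String)) × String :=
  ([["abcdefgh", "t"]], [("t", "abcdefgh")], [("t", "abcdefgh")], "abcdefgh")

def Spec_construct_diff_list (commits : List (List String)) (source_title_map : List (String × String)) (destination_title_map : List (String × String)) (end_hash : String) (out : List (List String)) : Prop := out = construct_diff_list_alt commits source_title_map destination_title_map end_hash
instance (commits : List (List String)) (source_title_map : List (String × String)) (destination_title_map : List (String × String)) (end_hash : String) (out : List (List String)) : Decidable (Spec_construct_diff_list commits source_title_map destination_title_map end_hash out) := by unfold Spec_construct_diff_list; infer_instance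

-- ===== CLAIM (what is proved, stated in full; the proofs are below) =====
def Claim_equal_construct_diff_list : Prop := ∀ (commits : List (List String)) (source_title_map : List (String × String)) (destination_title_map : List (String × String)) (end_hash : String), Dom_construct_diff_list commits source_title_map destination_title_map end_hash → Pre_construct_diff_list commits source_title_map destination_title_map end_hash → Spec_construct_diff_list commits source_title_map destination_title_map end_hash (construct_diff_list commits source_title_map destination_title_map end_hash)


-- ===== LEMMAS AND PROOFS =====

theorem cdlWhileB_lb (commits : List (List String)) (end_hash : String) (j : Nat) (r : Int) :
    j ≤ cdlWhileB commits end_hash j r := by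
  rw [cdlWhileB.eq_def]
  split
  · exact le_trans (Nat.le_succ j) (cdlWhileB_lb commits end_hash (j + 1) _)
  · exact le_refl j
termination_by commits.length - j
decreasing_by omega

theorem cdlWhileB_le (commits : List (List String)) (end_hash : String) (j : Nat) (r : Int)
    (hj : j ≤ commits.length) : cdlWhileB commits end_hash j r ≤ commits.length := by
  rw [cdlWhileB.eq_def]
  split
  · next h => exact cdlWhileB_le commits end_hash (j + 1) _ (by omega)
  · exact hj
termination_by commits.length - j
decreasing_by omega

theorem cdlCutoff_lb (commits : List (List String)) (end_hash : String) (e : Nat)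
    (he : e < commits.length) : e < cdlCutoff commits end_hash e := by
  rw [cdlCutoff.eq_def]
  simp only [dif_pos he]
  split
  · exact lt_of_lt_of_le (Nat.lt_succ_self e) (cdlWhileB_lb commits end_hash (e + 1) 5)
  · by_cases h2 : e + 1 < commits.length
    · exact lt_trans (Nat.lt_succ_self e) (cdlCutoff_lb commits end_hash (e + 1) h2)
    · rw [cdlCutoff.eq_def]; simp only [dif_neg h2]; omega
termination_by commits.length - e
decreasing_by omega

theorem cdlCutoff_le (commits : List (List String)) (end_hash : String) (e : Nat) :
    cdlCutoff commits end_hash e ≤ commits.length := by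
  rw [cdlCutoff.eq_def]
  split
  · next he =>
    split
    · exact cdlWhileB_le commits end_hash (e + 1) 5 (by omega)
    · exact cdlCutoff_le commits end_hash (e + 1)
  · exact le_refl _
termination_by commits.length - e
decreasing_by omega

-- cdlCnt facts
theorem cdlCnt_self (commits : List (List String)) (end_hash : String) (a : Nat) :
    cdlCnt commits end_hash a a = 0 := by simp [cdlCnt]

theorem cdlCnt_cons (commits : List (List String)) (end_hash : String) (a b : Nat)
    (ha : a < commits.length) (hab : a < b) :
    cdlCnt commits end_hash a b =
      (if (commits.getD a []).getD 0 "" = end_hash then 0 else 1) + cdlCnt commits end_hash (a + 1) b := by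
  unfold cdlCnt
  rw [List.drop_eq_getElem_cons ha]
  have : b - a = (b - (a + 1)) + 1 := by omega
  rw [this, List.take_succ_cons, List.countP_cons]
  have hg : commits.getD a [] = commits[a] := by
    rw [List.getD_eq_getElem?_getD, List.getElem?_eq_getElem ha]; rfl
  rw [hg]
  by_cases h : (commits[a]).getD 0 "" = end_hash <;> simp [h] <;> omega

theorem cdlCnt_mono (commits : List (List String)) (end_hash : String) (a a' b : Nat)
    (h1 : a ≤ a') (h2 : a' ≤ b) :
    cdlCnt commits end_hash a' b ≤ cdlCnt commits end_hash a b := by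
  unfold cdlCnt
  have hsplit : (commits.drop a).take (b - a) =
      (commits.drop a).take (a' - a) ++ (commits.drop a').take (b - a') := by
    have hb : b - a = (a' - a) + (b - a') := by omega
    rw [hb, List.take_add]
    congr 1
    rw [List.drop_drop]
    congr 2
    omega
  rw [hsplit, List.countP_append]
  omega

-- loop extent of the while phase: every processed index has seen fewer than r non-matching rows
theorem cdlWhileB_lt (commits : List (List String)) (end_hash : String) (j : Nat) (r : Int)
    (i : Nat) (hji : j ≤ i) (h : i < cdlWhileB commits end_hash j r) :
    i < commits.length ∧ (cdlCnt commits end_hash j i : Int) < r := by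
  rw [cdlWhileB.eq_def] at h
  split at h
  · next hc =>
    by_cases hij : i = j
    · subst hij
      refine ⟨hc.1, ?_⟩
      rw [cdlCnt_self]; exact_mod_cast hc.2
    · have hji' : j + 1 ≤ i := by omega
      have ih := cdlWhileB_lt commits end_hash (j + 1) _ i hji' h
      refine ⟨ih.1, ?_⟩
      rw [cdlCnt_cons commits end_hash j i hc.1 (by omega)]
      by_cases hh : (commits.getD j []).getD 0 "" = end_hash
      · simp only [hh, if_true] at ih ⊢; push_cast; omega
      · simp only [hh, if_false] at ih ⊢; push_cast at ih ⊢; omega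
  · omega
termination_by commits.length - j
decreasing_by omega

-- loop extent of the search phase: a reached index i satisfies the closed-form count condition
theorem cdlCutoff_lt (commits : List (List String)) (end_hash : String) (e i : Nat)
    (hei : e ≤ i) (h : i < cdlCutoff commits end_hash e) :
    i < commits.length ∧
      ∀ k, e ≤ k → k < i → (commits.getD k []).getD 0 "" = end_hash →
        cdlCnt commits end_hash (k + 1) i < 5 := by
  have hin : i < commits.length := lt_of_lt_of_le h (cdlCutoff_le commits end_hash e)
  refine ⟨hin, ?_⟩
  rw [cdlCutoff.eq_def] at h
  split at h
  · next he =>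
    split at h
    · next hmatch =>
      -- first match at e; extent is cdlWhileB (e+1) 5
      intro k hek hki hkm
      have hei1 : e + 1 ≤ i := by omega
      have hW := cdlWhileB_lt commits end_hash (e + 1) 5 i hei1 h
      have hmono := cdlCnt_mono commits end_hash (e + 1) (k + 1) i (by omega) (by omega)
      omega
    · next hmatch =>
      intro k hek hki hkm
      by_cases hik : k = e
      · subst hik; exact absurd hkm hmatch
      · exact (cdlCutoff_lt commits end_hash (e + 1) i (by omega) h).2 k (by omega) hki hkm
  · next he => omega
termination_by commits.length - e
decreasing_by omega

-- the segment commits[i:c]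
def cdlSeg (commits : List (List String)) (i c : Nat) : List (List String) :=
  (commits.drop i).take (c - i)

theorem cdlSeg_cons (commits : List (List String)) (i c : Nat)
    (hi : i < commits.length) (hc : i < c) :
    cdlSeg commits i c = commits.getD i [] :: cdlSeg commits (i + 1) c := by
  unfold cdlSeg
  rw [List.drop_eq_getElem_cons hi]
  have : c - i = (c - (i + 1)) + 1 := by omega
  rw [this, List.take_succ_cons, List.getD_eq_getElem?_getD, List.getElem?_eq_getElem hi]
  rfl

theorem cdlSeg_self (commits : List (List String)) (i : Nat) : cdlSeg commits i i = [] := by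
  simp [cdlSeg]

-- one processed row is classifiable under Pre_
theorem cdlClassify_isSome (title : String) (src dst : List (String × String))
    (h : (∃ p ∈ src, p.1 = title) ∨ (∃ p ∈ dst, p.1 = title)) :
    (cdlClassify title src dst).isSome := by
  unfold cdlClassify
  have hs : ∀ (m : List (String × String)), (∃ p ∈ m, p.1 = title) →
      (m.find? (fun p => p.1 == title)).isSome := by
    intro m hm
    rw [List.find?_isSome]
    obtain ⟨p, hp, he⟩ := hm
    exact ⟨p, hp, by simp [he]⟩
  rcases h with h | h
  · rcases Option.isSome_iff_exists.mp (hs _ h) with ⟨p, hp⟩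
    cases hd : dst.find? (fun p => p.1 == title) <;> simp [hp, hd] <;> split <;> simp
  · rcases Option.isSome_iff_exists.mp (hs _ h) with ⟨p, hp⟩
    cases hsrc : src.find? (fun p => p.1 == title) <;> simp [hsrc, hp] <;> split <;> simp

-- a classifiable head row renders separately from the rest
theorem cdlRender_singleton_append (src dst : List (String × String)) (row : List String)
    (rest : List (List String)) (h : (cdlClassify (row.getD 1 "") src dst).isSome) :
    cdlRender src dst (row :: rest) = cdlRender src dst [row] ++ cdlRender src dst rest := by
  obtain ⟨c, hc⟩ := Option.isSome_iff_exists.mp h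
  simp only [cdlRender]
  rw [hc]
  simp

-- one step of A's loop: process the classifiable row j, then break or continue with updated state
theorem cdlLoopA_step (commits : List (List String)) (src dst : List (String × String))
    (end_hash : String) (j : Nat) (r : Int) (cd : Bool) (rows : List (List String))
    (hj : j < commits.length) (hr : ¬ r ≤ 0)
    (hcls : (cdlClassify ((commits.getD j []).getD 1 "") src dst).isSome) :
    cdlLoopA commits src dst end_hash j r cd rows =
      if j + 1 ≥ commits.length then
        rows ++ cdlRender src dst [commits.getD j []]
      else
        cdlLoopA commits src dst end_hash (j + 1)
          (if (commits.getD j []).getD 0 "" == end_hash then r else if cd then r - 1 else r)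
          (if (commits.getD j []).getD 0 "" == end_hash then true else cd)
          (rows ++ cdlRender src dst [commits.getD j []]) := by
  have hrows : ∀ hdr : String,
      (if ((src.find? (fun p => p.1 == (commits.getD j []).getD 1 "")).map (·.2)).isSome &&
            ((dst.find? (fun p => p.1 == (commits.getD j []).getD 1 "")).map (·.2)).isSome &&
            ((src.find? (fun p => p.1 == (commits.getD j []).getD 1 "")).map (·.2) ==
             (dst.find? (fun p => p.1 == (commits.getD j []).getD 1 "")).map (·.2))
        then rows ++ [[hdr, "\x1B[92m"]]
        else if ((src.find? (fun p => p.1 == (commits.getD j []).getD 1 "")).map (·.2)).isSome &&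
            ((dst.find? (fun p => p.1 == (commits.getD j []).getD 1 "")).map (·.2)).isSome
        then rows ++ [[hdr, "\x1B[93m"]]
        else if ((dst.find? (fun p => p.1 == (commits.getD j []).getD 1 "")).map (·.2)).isSome
        then rows ++ [[hdr, "\x1B[91m"]]
        else if ((src.find? (fun p => p.1 == (commits.getD j []).getD 1 "")).map (·.2)).isSome
        then rows ++ [[hdr, "\x1B[95m"]]
        else rows) =
      rows ++ [[hdr,
        (cdlClassify ((commits.getD j []).getD 1 "") src dst).getD ""]] := by
    intro hdr
    have hcl := hcls
    simp only [cdlClassify] at hcl ⊢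
    cases hs : src.find? (fun p => p.1 == (commits.getD j []).getD 1 "") <;>
      cases hd : dst.find? (fun p => p.1 == (commits.getD j []).getD 1 "") <;>
      rw [hs, hd] at hcl <;>
      first
        | (exfalso; revert hcl; simp; done)
        | (simp [beq_iff_eq]; try (split_ifs <;> simp); done)
  obtain ⟨c, hc⟩ := Option.isSome_iff_exists.mp hcls
  rw [cdlLoopA.eq_def, if_neg hr]
  simp only [hrows, cdlRender, hc, ge_iff_le]
  rfl

-- countdown phase: from state (j, r, countdown = true) A appends the rendered rows of
-- commits[j : cdlWhileB j r]; only the rows of that extent need be classifiable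
theorem cdlLoopA_true (commits : List (List String)) (src dst : List (String × String))
    (end_hash : String) (j : Nat) (r : Int) (rows : List (List String))
    (hj : j < commits.length)
    (hwf : ∀ k, j ≤ k → k < cdlWhileB commits end_hash j r →
      (cdlClassify ((commits.getD k []).getD 1 "") src dst).isSome) :
    cdlLoopA commits src dst end_hash j r true rows =
      rows ++ cdlRender src dst (cdlSeg commits j (cdlWhileB commits end_hash j r)) := by
  by_cases hr : r ≤ 0
  · rw [cdlLoopA.eq_def, if_pos hr, cdlWhileB.eq_def, dif_neg (fun h => absurd h.2 (by omega)),
      cdlSeg_self]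
    simp [cdlRender]
  · have hjW : j < cdlWhileB commits end_hash j r := by
      rw [cdlWhileB.eq_def, dif_pos ⟨hj, by omega⟩]
      exact lt_of_lt_of_le (Nat.lt_succ_self j) (cdlWhileB_lb commits end_hash (j + 1) _)
    have hcls := hwf j (le_refl j) hjW
    have hW : cdlWhileB commits end_hash j r =
        cdlWhileB commits end_hash (j + 1)
          (if (commits.getD j []).getD 0 "" = end_hash then r else r - 1) := by
      rw [cdlWhileB.eq_def, dif_pos ⟨hj, by omega⟩]
    have hr' : (if ((commits.getD j []).getD 0 "" == end_hash) then r else if true then r - 1 else r)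
        = (if (commits.getD j []).getD 0 "" = end_hash then r else r - 1) := by
      simp [beq_iff_eq]
    have hcd' : (if ((commits.getD j []).getD 0 "" == end_hash) then true else true) = true := by
      simp
    rw [cdlLoopA_step commits src dst end_hash j r true rows hj hr hcls, hr', hcd']
    rw [cdlSeg_cons commits j _ hj hjW]
    by_cases hend : j + 1 ≥ commits.length
    · rw [if_pos hend]
      have hWn : cdlWhileB commits end_hash (j + 1)
          (if (commits.getD j []).getD 0 "" = end_hash then r else r - 1) = j + 1 := by
        rw [cdlWhileB.eq_def, dif_neg (fun h => absurd h.1 (by omega))]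
      rw [hW, hWn, cdlSeg_self]
      try simp [cdlRender]
    · rw [if_neg hend]
      have hwf' : ∀ k, j + 1 ≤ k → k < cdlWhileB commits end_hash (j + 1)
          (if (commits.getD j []).getD 0 "" = end_hash then r else r - 1) →
          (cdlClassify ((commits.getD k []).getD 1 "") src dst).isSome := by
        intro k hk1 hk2
        exact hwf k (by omega) (by rw [hW]; exact hk2)
      rw [cdlLoopA_true commits src dst end_hash (j + 1) _ _ (by omega) hwf']
      rw [hW]
      rw [cdlRender_singleton_append src dst (commits.getD j [])
        (cdlSeg commits (j + 1) (cdlWhileB commits end_hash (j + 1)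
          (if (commits.getD j []).getD 0 "" = end_hash then r else r - 1))) hcls,
        List.append_assoc]
termination_by commits.length - j
decreasing_by omega

-- search phase: with countdown still false and trailing_rows untouched at 5, A appends the rendered
-- rows of commits[i : cdlCutoff i]; only the rows of that extent need be classifiable
theorem cdlLoopA_false (commits : List (List String)) (src dst : List (String × String))
    (end_hash : String) (i : Nat) (rows : List (List String)) (hi : i < commits.length)
    (hwf : ∀ k, i ≤ k → k < cdlCutoff commits end_hash i →
      (cdlClassify ((commits.getD k []).getD 1 "") src dst).isSome) :
    cdlLoopA commits src dst end_hash i 5 false rows =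
      rows ++ cdlRender src dst (cdlSeg commits i (cdlCutoff commits end_hash i)) := by
  have hC : i < cdlCutoff commits end_hash i := cdlCutoff_lb commits end_hash i hi
  have hcls := hwf i (le_refl i) hC
  rw [cdlLoopA_step commits src dst end_hash i 5 false rows hi (by omega) hcls]
  rw [cdlSeg_cons commits i _ hi hC]
  rw [cdlCutoff.eq_def, dif_pos hi]
  by_cases hhash : (commits.getD i []).getD 0 "" = end_hash
  · rw [if_pos hhash]
    simp only [hhash, beq_self_eq_true, if_true]
    have hCW : cdlCutoff commits end_hash i = cdlWhileB commits end_hash (i + 1) 5 := by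
      rw [cdlCutoff.eq_def, dif_pos hi, if_pos hhash]
    by_cases hend : i + 1 ≥ commits.length
    · rw [if_pos hend, cdlWhileB.eq_def, dif_neg (fun h => absurd h.1 (by omega)), cdlSeg_self]
      try simp [cdlRender]
    · rw [if_neg hend]
      have hwf' : ∀ k, i + 1 ≤ k → k < cdlWhileB commits end_hash (i + 1) 5 →
          (cdlClassify ((commits.getD k []).getD 1 "") src dst).isSome := by
        intro k hk1 hk2
        exact hwf k (by omega) (by rw [hCW]; exact hk2)
      rw [cdlLoopA_true commits src dst end_hash (i + 1) 5 _ (by omega) hwf']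
      rw [cdlRender_singleton_append src dst (commits.getD i [])
        (cdlSeg commits (i + 1) (cdlWhileB commits end_hash (i + 1) 5)) hcls,
        List.append_assoc]
  · rw [if_neg hhash]
    have hbeq : ((commits.getD i []).getD 0 "" == end_hash) = false :=
      beq_eq_false_iff_ne.mpr hhash
    simp only [hbeq, Bool.false_eq_true, if_false]
    have hCC : cdlCutoff commits end_hash i = cdlCutoff commits end_hash (i + 1) := by
      rw [cdlCutoff.eq_def, dif_pos hi, if_neg hhash]
    by_cases hend : i + 1 ≥ commits.length
    · rw [if_pos hend]
      have : cdlCutoff commits end_hash (i + 1) = commits.length := by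
        rw [cdlCutoff.eq_def, dif_neg (by omega)]
      rw [this]
      have : commits.length = i + 1 := by omega
      rw [this, cdlSeg_self]
      try simp [cdlRender]
    · rw [if_neg hend]
      have hwf' : ∀ k, i + 1 ≤ k → k < cdlCutoff commits end_hash (i + 1) →
          (cdlClassify ((commits.getD k []).getD 1 "") src dst).isSome := by
        intro k hk1 hk2
        exact hwf k (by omega) (by rw [hCC]; exact hk2)
      rw [cdlLoopA_false commits src dst end_hash (i + 1) _ (by omega) hwf']
      rw [cdlRender_singleton_append src dst (commits.getD i [])
        (cdlSeg commits (i + 1) (cdlCutoff commits end_hash (i + 1))) hcls,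
        List.append_assoc]
termination_by commits.length - i
decreasing_by omega

-- ===== VERDICT (by name: the statement is the Claim_ definition above) =====
theorem construct_diff_list_spec : Claim_equal_construct_diff_list := by
  intro commits src dst end_hash _hdom hpre
  obtain ⟨hne, hwf⟩ := hpre
  unfold Spec_construct_diff_list construct_diff_list construct_diff_list_alt
  have h0 : 0 < commits.length := List.length_pos_of_ne_nil hne
  have hwfTop : ∀ k, 0 ≤ k → k < cdlCutoff commits end_hash 0 →
      (cdlClassify ((commits.getD k []).getD 1 "") src dst).isSome := by
    intro k _ hk
    have hchar := cdlCutoff_lt commits end_hash 0 k (Nat.zero_le k) hk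
    have hrow := hwf k hchar.1 (fun e he hm => hchar.2 e (Nat.zero_le e) he hm)
    exact cdlClassify_isSome _ src dst hrow.2
  rw [cdlLoopA_false commits src dst end_hash 0 [] h0 hwfTop]
  simp [cdlSeg]
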